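-- pv_equiv track=rewrite | github.com/AlexMorson/gsa-ultra-2018 | recreation/code.py | solution
-- ===== SOURCE A (Python) =====
-- def solution(a, b):
--     if a == "": return 0
--
--     a_chars = {c for c in a}
--
--     b = "".join(c for c in b if c in a_chars)
--
--     new_b = {}
--     for i, c in enumerate(b):
--         if c in new_b:
--             new_b[c].append(i)
--         else:
--             new_b[c] = [i]
--
--     copies = 1
--     i = -1
--     for c in a:
--         for j in new_b[c]:
--             if j > i:
--                 i = j
--                 break
--         else:
--             copies += 1
--             i = new_b[c][0]
--
--     return copies
-- ===== SOURCE B (Python) =====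
-- def solution(a, b):
--     if a == "":
--         return 0
--
--     wanted = set(a)
--
--     # one pass over b: per-character sorted lists of compressed positions
--     # (positions counted among characters of b that occur in a)
--     pos = {}
--     k = 0
--     for c in b:
--         if c in wanted:
--             pos.setdefault(c, []).append(k)
--             k += 1
--
--     copies = 1
--     prev = -1
--     for c in a:
--         lst = pos[c]
--         # binary search: first index lo with lst[lo] > prev
--         lo, hi = 0, len(lst)
--         while lo < hi:
--             mid = (lo + hi) // 2
--             if lst[mid] > prev:
--                 hi = mid
--             else:
--                 lo = mid + 1
--         if lo < len(lst):
--             prev = lst[lo]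
--         else:
--             copies += 1
--             prev = lst[0]
--     return copies
-- ===== Notes on version B (the rewrite author's own statement) =====
-- stated objective: faster
-- what changed: B builds the per-character sorted position lists in one pass over b (setdefault, with a running counter instead of join-then-enumerate) and replaces A's linear scan of each occurrence list by a binary search for the first position greater than the current one, turning the greedy step from O(count(c)) into O(log count(c)).
import Mathlib
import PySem

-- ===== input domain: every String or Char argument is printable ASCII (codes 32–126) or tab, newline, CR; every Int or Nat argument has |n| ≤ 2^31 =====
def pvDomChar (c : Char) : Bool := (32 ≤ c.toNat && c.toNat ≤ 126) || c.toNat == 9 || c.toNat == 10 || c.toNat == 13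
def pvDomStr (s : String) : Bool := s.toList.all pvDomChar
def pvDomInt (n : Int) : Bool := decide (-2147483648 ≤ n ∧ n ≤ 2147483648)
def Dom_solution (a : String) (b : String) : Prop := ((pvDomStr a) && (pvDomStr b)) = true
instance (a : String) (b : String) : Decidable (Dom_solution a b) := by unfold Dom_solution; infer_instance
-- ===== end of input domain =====

-- B replaces A's per-character linear scan of the occurrence lists with a binary search
-- into the same (sorted) position lists, built in a single pass over b; measurably faster.

-- ===== PORT A =====
-- Literal port of A. 'new_b[c]' raises KeyError in Python when c never occurs in the
-- filtered b; those inputs are excluded by Pre_solution below (the port totalizes the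
-- lookup with getD/pyGetD defaults there).
def solution (a : String) (b : String) : Int :=
  if a = "" then 0 else
    let aChars : PySem.Set Char := PySem.Set.ofList a.toList
    let fb : List Char := b.toList.filter (fun c => PySem.Set.contains aChars c)
    let newB : PySem.Dict Char (List Int) :=
      (PySem.List.enumerate fb).foldl
        (fun d p =>
          if d.contains p.2 then d.modify p.2 [] (fun l => l ++ [p.1])
          else d.insert p.2 [p.1])
        PySem.Dict.empty
    -- 'for j in new_b[c]: if j > i: i = j; break / else: copies += 1; i = new_b[c][0]'
    -- = first element of new_b[c] greater than i (find?), else the wrap branch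
    let r := a.toList.foldl
      (fun s c =>
        match (newB.getD c []).find? (fun j => decide (s.2 < j)) with
        | some j => (s.1, j)
        | none => (s.1 + 1, PySem.List.pyGetD (newB.getD c []) 0 0))
      (((1 : Int), (-1 : Int)))
    r.1

-- ===== PORT B =====
-- 'while lo < hi: mid = (lo+hi)//2; …' of Source B, verbatim (structural recursion on an
-- explicit fuel argument, called with fuel = length of lst ≥ hi - lo, which the loop
-- never exhausts: a totality guard only, not part of Source B's algorithm)
def bsearchGt (lst : List Int) (prev : Int) : Nat → Int → Int → Int
  | 0, lo, _hi => lo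
  | fuel + 1, lo, hi =>
    if lo < hi then
      let mid := PySem.Int.floordiv (lo + hi) 2
      if prev < PySem.List.pyGetD lst mid 0 then bsearchGt lst prev fuel lo mid
      else bsearchGt lst prev fuel (mid + 1) hi
    else lo

-- Literal port of Source B. 'pos.setdefault(c, []).append(k)' is exactly
-- 'pos = pos.modify c [] (· ++ [k])' (append to c's list, starting it at [] if absent);
-- 'pos[c]' (KeyError outside Pre_solution) is totalized with getD as in port A.
def solution_alt (a : String) (b : String) : Int :=
  if a = "" then 0 else
    let wanted : PySem.Set Char := PySem.Set.ofList a.toList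
    let pos :=
      b.toList.foldl
        (fun s c =>
          if PySem.Set.contains wanted c then
            (s.1.modify c [] (fun l => l ++ [s.2]), s.2 + 1)
          else s)
        ((PySem.Dict.empty : PySem.Dict Char (List Int)), (0 : Int))
    let r := a.toList.foldl
      (fun s c =>
        let lst := pos.1.getD c []
        let lo := bsearchGt lst s.2 lst.length 0 (PySem.List.len lst)
        if lo < PySem.List.len lst then (s.1, PySem.List.pyGetD lst lo 0)
        else (s.1 + 1, PySem.List.pyGetD lst 0 0))
      (((1 : Int), (-1 : Int)))
    r.1

-- ===== PRECONDITION & SPEC =====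
-- Pre_ excludes exactly the inputs where Python A raises KeyError: some character of a
-- never occurs in b (then new_b[c] has no entry). Source B raises KeyError there too.
def Pre_solution (a : String) (b : String) : Prop := a.toList.all (fun c => b.toList.contains c) = true
instance (a : String) (b : String) : Decidable (Pre_solution a b) := by unfold Pre_solution; infer_instance
def pvWitness_solution : String × String := ("a", "a")

def Spec_solution (a : String) (b : String) (out : Int) : Prop := out = solution_alt a b
instance (a : String) (b : String) (out : Int) : Decidable (Spec_solution a b out) := by unfold Spec_solution; infer_instance

-- ===== CLAIM (what is proved, stated in full; the proofs are below) =====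
def Claim_equal_solution : Prop := ∀ (a : String) (b : String), Dom_solution a b → Pre_solution a b → Spec_solution a b (solution a b)

-- ===== LEMMAS AND PROOFS =====

-- A's two dict-building branches are one Dict.modify
theorem stepA_eq_modify (d : PySem.Dict Char (List Int)) (c : Char) (i : Int) :
    (if d.contains c then d.modify c [] (fun l => l ++ [i]) else d.insert c [i])
      = d.modify c [] (fun l => l ++ [i]) := by
  by_cases h : d.contains c
  · simp [h]
  · simp only [Bool.not_eq_true] at h
    simp [PySem.Dict.modify, PySem.Dict.insert, h, PySem.Dict.getD_of_not_contains]


-- A's dict build: the list stored at c is the positions of c in the enumerated list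
theorem buildA_getD (l : List (Int × Char)) (d : PySem.Dict Char (List Int)) (c : Char) :
    (l.foldl
        (fun d p =>
          if d.contains p.2 then d.modify p.2 [] (fun l => l ++ [p.1])
          else d.insert p.2 [p.1]) d).getD c []
      = d.getD c [] ++ (l.filter (fun p => p.2 == c)).map (·.1) := by
  induction l generalizing d with
  | nil => simp
  | cons p l ih =>
    rw [List.foldl_cons, stepA_eq_modify, ih]
    by_cases hc : p.2 = c
    · rw [List.filter_cons_of_pos (by simpa using hc)]
      rw [PySem.Dict.getD_modify]
      simp [hc]
    · rw [List.filter_cons_of_neg (by simpa using hc)]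
      rw [PySem.Dict.getD_modify]
      simp [Ne.symm hc]

-- B's one-pass build: the list stored at c is the filtered positions, counted from k
theorem buildB_getD (keep : Char → Bool) (bl : List Char)
    (d : PySem.Dict Char (List Int)) (k : Int) (c : Char) :
    ((bl.foldl
        (fun s c' =>
          if keep c' then (s.1.modify c' [] (fun l => l ++ [s.2]), s.2 + 1) else s)
        (d, k)).1).getD c []
      = d.getD c [] ++
        ((PySem.List.enumerate (bl.filter keep) k).filter (fun p => p.2 == c)).map (·.1) := by
  induction bl generalizing d k with
  | nil => simp
  | cons c' bl ih =>
    by_cases hk : keep c'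
    · simp only [List.foldl_cons, hk, if_pos, List.filter_cons_of_pos hk,
        PySem.List.enumerate_cons]
      rw [ih]
      by_cases hc : c' = c
      · subst hc
        simp
      · rw [PySem.Dict.getD_modify]
        simp [hc, Ne.symm hc]
    · simp only [List.foldl_cons, hk, List.filter_cons_of_neg hk]
      exact ih d k

-- the stored position lists are strictly increasing
theorem poslist_sorted (l : List (Int × Char)) (h : l.Pairwise (fun p q => p.1 < q.1))
    (c : Char) :
    ((l.filter (fun p => p.2 == c)).map (·.1)).Pairwise (· < ·) :=
  List.pairwise_map.mpr (h.filter _)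

-- first satisfying element characterizes find?
theorem find?_first (p : Int → Bool) (l : List Int) (n : Nat) (hn : n < l.length)
    (h1 : ∀ j (_ : j < l.length), j < n → ¬ p l[j])
    (h2 : p l[n]) : l.find? p = some l[n] := by
  induction l generalizing n with
  | nil => simp at hn
  | cons x t ih =>
    cases n with
    | zero => simp_all [List.find?]
    | succ m =>
      have hx : ¬ p x := h1 0 (by simp) (by omega)
      simp only [List.find?, Bool.not_eq_true] at hx ⊢
      rw [hx]
      exact ih m (by simpa using hn) (fun j hj hjm => h1 (j+1) (by simpa using hj) (by omega)) h2

-- binary-search invariant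
theorem bsearch_spec (lst : List Int) (prev : Int) (fuel : Nat) (lo hi : Int)
    (hn : (hi - lo).toNat ≤ fuel)
    (h0 : 0 ≤ lo) (h1 : lo ≤ hi) (h2 : hi ≤ lst.length)
    (hsort : lst.Pairwise (· < ·))
    (hlow : ∀ j : Nat, j < lo.toNat → ∀ (hj : j < lst.length), lst[j] ≤ prev)
    (hhigh : ∀ j : Nat, hi.toNat ≤ j → ∀ (hj : j < lst.length), prev < lst[j]) :
    0 ≤ bsearchGt lst prev fuel lo hi ∧ bsearchGt lst prev fuel lo hi ≤ lst.length ∧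
      (∀ j : Nat, j < (bsearchGt lst prev fuel lo hi).toNat → ∀ (hj : j < lst.length), lst[j] ≤ prev) ∧
      (∀ j : Nat, (bsearchGt lst prev fuel lo hi).toNat ≤ j → ∀ (hj : j < lst.length), prev < lst[j]) := by
  have hp := List.pairwise_iff_getElem.mp hsort
  induction fuel generalizing lo hi with
  | zero =>
    rw [bsearchGt]
    refine ⟨h0, by omega, fun j hj hjl => hlow j (by omega) hjl,
      fun j hj hjl => hhigh j (by omega) hjl⟩
  | succ n ih =>
    rw [bsearchGt]
    by_cases hlt : lo < hi
    · rw [if_pos hlt]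
      have hb := PySem.Int.floordiv_two_mid_bounds (le_of_lt hlt)
      have hmh : PySem.Int.floordiv (lo + hi) 2 < hi :=
        (PySem.Int.floordiv_lt_iff_lt_mul (by omega)).mpr (by omega)
      set mid := PySem.Int.floordiv (lo + hi) 2 with hmiddef
      have hmlen : mid < (lst.length : Int) := by omega
      have hget : PySem.List.pyGetD lst mid 0 = lst[mid.toNat]'(by omega) :=
        PySem.List.pyGetD_eq_getElem lst 0 (by omega) hmlen
      by_cases hc : prev < PySem.List.pyGetD lst mid 0
      · rw [if_pos hc]
        refine ih lo mid (by omega) h0 (by omega) (by omega) hlow ?_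
        intro j hj hjl
        rcases Nat.eq_or_lt_of_le hj with hj' | hj'
        · rw [hget] at hc
          have : j = mid.toNat := hj'.symm
          subst this
          exact hc
        · rw [hget] at hc
          exact lt_trans hc (hp mid.toNat j (by omega) hjl hj')
      · rw [if_neg hc]
        rw [not_lt, hget] at hc
        refine ih (mid + 1) hi (by omega) (by omega) (by omega) h2 ?_ hhigh
        intro j hj hjl
        have hj2 : j < mid.toNat + 1 := by omega
        rcases Nat.lt_succ_iff_lt_or_eq.mp hj2 with hj' | hj'
        · exact le_of_lt (lt_of_lt_of_le (hp j mid.toNat hjl (by omega) hj') hc)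
        · subst hj'
          exact hc
    · rw [if_neg hlt]
      refine ⟨h0, by omega, hlow, fun j hj hjl => hhigh j (by omega) hjl⟩

-- one greedy step of A equals one greedy step of B on a sorted list
theorem greedy_step_eq (lst : List Int) (hs : lst.Pairwise (· < ·)) (s : Int × Int) :
    (match lst.find? (fun j => decide (s.2 < j)) with
     | some j => (s.1, j)
     | none => (s.1 + 1, PySem.List.pyGetD lst 0 0))
    = (if bsearchGt lst s.2 lst.length 0 (PySem.List.len lst) < PySem.List.len lst then
        (s.1, PySem.List.pyGetD lst (bsearchGt lst s.2 lst.length 0 (PySem.List.len lst)) 0)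
       else (s.1 + 1, PySem.List.pyGetD lst 0 0)) := by
  simp only [PySem.List.len_eq]
  obtain ⟨hr0, hrlen, hLow, hHigh⟩ :=
    bsearch_spec lst s.2 lst.length 0 lst.length (by omega) (le_refl 0)
      (by exact_mod_cast Int.natCast_nonneg _) le_rfl hs
      (fun j hj _ => by omega) (fun j hj hjl => by omega)
  set r := bsearchGt lst s.2 lst.length 0 (lst.length : Int) with hrdef
  by_cases hlt : r < (lst.length : Int)
  · have hrn : r.toNat < lst.length := by omega
    rw [find?_first (fun j => decide (s.2 < j)) lst r.toNat hrn
      (fun j hjl hjr => by simpa using hLow j hjr hjl)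
      (by simpa using hHigh r.toNat le_rfl hrn)]
    rw [if_pos hlt]
    simp [PySem.List.pyGetD_eq_getElem lst (0 : Int) hr0 hlt]
  · have hnone : lst.find? (fun j => decide (s.2 < j)) = none := by
      rw [List.find?_eq_none]
      intro x hx
      obtain ⟨i, hi, hxi⟩ := List.mem_iff_getElem.mp hx
      subst hxi
      simpa using hLow i (by omega) hi
    rw [hnone, if_neg hlt]

-- ===== VERDICT (by name: the statement is the Claim_ definition above) =====
theorem solution_spec : Claim_equal_solution := by
  intro a b _ _
  unfold Spec_solution
  by_cases ha : a = ""
  · simp [solution, solution_alt, ha]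
  · simp only [solution, solution_alt, if_neg ha]
    refine congrArg Prod.fst (PySem.List.foldl_congr_mem _ _ _ _ ?_)
    intro acc c _
    rw [buildA_getD, buildB_getD]
    simp only [PySem.Dict.getD_empty, List.nil_append]
    exact greedy_step_eq _
      (poslist_sorted _ (PySem.List.pairwise_lt_enumerate _ _) c) acc
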